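-- pv_equiv track=rewrite | github.com/prabhat24/assignment3 | new.py | print_s
-- ===== SOURCE A (Python) =====
-- def check_if_print(i, j, k):
--     if (j - i) < k:
--         return True
--     return False
--
-- def print_s(a, k):
--     i = 0
--     j = 0
--     result = ""
--     while (i <= len(a) - 1 and j <= len(a) - 1):
--         while (j <= len(a) - 1 and a[i] == a[j]):
--             j = j + 1
--             # ari != arj
--         if check_if_print(i, j, k):
--             result = result + a[i:j]
--         ## make i and j same
--         i = j
--     return result
-- ===== SOURCE B (Python) =====
-- def print_s(a, k):
--     parts = []
--     run = []
--     for c in a: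
--         if run and run[-1] == c:
--             run.append(c)
--         else:
--             if run and len(run) < k:
--                 parts.append(''.join(run))
--             run = [c]
--     if run and len(run) < k:
--         parts.append(''.join(run))
--     return ''.join(parts)
-- ===== Notes on version B (the rewrite author's own statement) =====
-- stated objective: simpler
-- what changed: Replaced the two-pointer i/j index bookkeeping and the check_if_print helper with a single forward pass that accumulates the current run of equal characters and flushes it when it ends (kept only if shorter than k), joining the kept parts once at the end instead of repeatedly concatenating strings.
import Mathlib
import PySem

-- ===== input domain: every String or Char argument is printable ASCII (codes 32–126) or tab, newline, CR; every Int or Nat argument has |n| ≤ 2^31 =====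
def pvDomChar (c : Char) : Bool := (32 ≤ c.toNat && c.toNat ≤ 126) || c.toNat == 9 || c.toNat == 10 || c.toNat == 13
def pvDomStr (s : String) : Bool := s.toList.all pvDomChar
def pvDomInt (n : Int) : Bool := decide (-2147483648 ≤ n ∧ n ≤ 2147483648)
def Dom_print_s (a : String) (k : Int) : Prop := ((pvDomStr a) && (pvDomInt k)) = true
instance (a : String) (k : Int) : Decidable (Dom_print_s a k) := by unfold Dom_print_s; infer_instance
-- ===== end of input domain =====

-- B replaces A's two-pointer i/j index bookkeeping (and the check_if_print helper) by a
-- single pass that accumulates the current run and flushes it when it ends (objective: simpler).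

-- ===== PORT A =====
-- inner loop: 'while (j <= len(a)-1 and a[i] == a[j]): j = j + 1'
def innerA (a : List Char) (i j : Nat) : Nat :=
  if h : j < a.length ∧ a[i]? = a[j]? then innerA a i (j + 1) else j
termination_by a.length - j
decreasing_by omega

-- these two lemmas are needed by outerA's decreasing_by (the outer loop advances)
theorem innerA_ge (a : List Char) (i j : Nat) : j ≤ innerA a i j := by
  fun_induction innerA <;> omega

theorem innerA_gt (a : List Char) (i : Nat) (h : i < a.length) : i < innerA a i i := by
  rw [innerA]
  simp only [h, true_and]
  exact Nat.lt_of_succ_le (innerA_ge a i (i + 1))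

-- outer while loop; at its head i = j always (i = 0 = j initially, and 'i = j' is the last
-- statement of each iteration), so a single index i carries both; result accumulates.
def outerA (a : List Char) (k : Int) (i : Nat) (result : List Char) : List Char :=
  if h : i < a.length then
    let j := innerA a i i
    -- 'if check_if_print(i, j, k): result = result + a[i:j]'  ((j - i) < k; a[i:j] with 0 ≤ i ≤ j)
    let result' := if ((j : Int) - (i : Int)) < k then result ++ (a.drop i).take (j - i) else result
    outerA a k j result'
  else result
termination_by a.length - i
decreasing_by have := innerA_gt a i h; omega

def print_s (a : String) (k : Int) : String :=
  String.ofList (outerA a.toList k 0 [])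

-- ===== PORT B =====
-- one step of B's for-loop over the characters: extend the current run or flush it
def stepB (k : Int) (st : List (List Char) × List Char) (c : Char) : List (List Char) × List Char :=
  match st with
  | (parts, run) =>
    if run ≠ [] ∧ run.getLast? = some c then (parts, run ++ [c])
    else
      ((if run ≠ [] ∧ ((run.length : Int) < k) then parts ++ [run] else parts), [c])

-- the final flush after the loop
def finishB (k : Int) (st : List (List Char) × List Char) : List (List Char) :=
  if st.2 ≠ [] ∧ ((st.2.length : Int) < k) then st.1 ++ [st.2] else st.1

def print_s_alt (a : String) (k : Int) : String :=
  String.ofList ((finishB k (a.toList.foldl (stepB k) ([], []))).flatten)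

-- ===== PRECONDITION & SPEC =====
def Spec_print_s (a : String) (k : Int) (out : String) : Prop := out = print_s_alt a k
instance (a : String) (k : Int) (out : String) : Decidable (Spec_print_s a k out) := by unfold Spec_print_s; infer_instance

-- ===== CLAIM (what is proved, stated in full; the proofs are below) =====
def Claim_equal_print_s : Prop := ∀ (a : String) (k : Int), Dom_print_s a k → Spec_print_s a k (print_s a k)

-- ===== LEMMAS AND PROOFS =====
-- canonical form both ports are reduced to: process the string run by maximal run,
-- keeping exactly the runs of length < k
def chunks (l : List Char) (k : Int) : List Char :=
  match l with
  | [] => []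
  | c :: t =>
    let r := (c :: t).takeWhile (· == c)
    (if ((r.length : Int) < k) then r else []) ++ chunks ((c :: t).drop r.length) k
termination_by l.length
decreasing_by simp_all [List.takeWhile]

theorem chunks_cons (c : Char) (t : List Char) (k : Int) :
    chunks (c :: t) k =
      (if (((c :: t).takeWhile (· == c)).length : Int) < k then (c :: t).takeWhile (· == c) else [])
        ++ chunks ((c :: t).drop ((c :: t).takeWhile (· == c)).length) k := by
  rw [chunks]

theorem innerA_eq (a : List Char) (c : Char) (i : Nat) (hi : a[i]? = some c) (j : Nat) :
    innerA a i j = j + ((a.drop j).takeWhile (· == c)).length := by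
  fun_induction innerA a i j with
  | case1 j h ih =>
    obtain ⟨hj, he⟩ := h
    have hc : a[j] = c := by
      have := he.symm.trans hi
      simpa [List.getElem?_eq_getElem hj] using this
    rw [List.drop_eq_getElem_cons hj, hc]
    simp [ih]
    omega
  | case2 j h =>
    rcases Nat.lt_or_ge j a.length with hj | hj
    · have hne : a[j] ≠ c := by
        intro hc
        exact h ⟨hj, by simp [List.getElem?_eq_getElem hj, hc, hi]⟩
      rw [List.drop_eq_getElem_cons hj]
      simp [hne]
    · simp [List.drop_eq_nil_of_le hj]

theorem outerA_eq (a : List Char) (k : Int) (i : Nat) (res : List Char) :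
    outerA a k i res = res ++ chunks (a.drop i) k := by
  fun_induction outerA a k i res with
  | case1 i res h j result' ih =>
    have hi : a[i]? = some a[i] := List.getElem?_eq_getElem h
    have hj : j = i + ((a.drop i).takeWhile (· == a[i])).length := innerA_eq a a[i] i hi i
    set t := (a.drop i).takeWhile (· == a[i]) with ht
    have hdrop : a.drop i = a[i] :: a.drop (i + 1) := List.drop_eq_getElem_cons h
    have htw : (a.drop i).takeWhile (· == a[i]) = t := rfl
    have hch : chunks (a.drop i) k =
        (if ((t.length : Int) < k) then t else []) ++ chunks ((a.drop i).drop t.length) k := by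
      conv_lhs => rw [hdrop, chunks]
      rw [← hdrop, htw]
    have htake : (a.drop i).take (j - i) = t := by
      have hpre : t <+: a.drop i := List.takeWhile_prefix _
      have heq : t = (a.drop i).take t.length := List.prefix_iff_eq_take.mp hpre
      rw [hj, Nat.add_sub_cancel_left]
      exact heq.symm
    have hdd : (a.drop i).drop t.length = a.drop j := by
      rw [hj, List.drop_drop]
    have hcond : (((j : Int) - (i : Int)) < k) ↔ ((t.length : Int) < k) := by
      rw [hj]; push_cast; constructor <;> intro <;> omega
    rw [ih, hch, hdd]
    simp only [result']
    split_ifs with h1 h2 h2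
    · rw [htake]; simp
    · exact absurd (hcond.mp h1) h2
    · exact absurd (hcond.mpr h2) h1
    · simp
  | case2 i res h =>
    have : a.length ≤ i := Nat.le_of_not_lt h
    simp [List.drop_eq_nil_of_le this, chunks]

theorem B_run (k : Int) :
    ∀ (l : List Char) (parts : List (List Char)) (run : List Char) (c : Char),
      run ≠ [] → (∀ x ∈ run, x = c) →
      (finishB k (l.foldl (stepB k) (parts, run))).flatten =
        parts.flatten ++
          ((if (((run.length : Int) + ((l.takeWhile (· == c)).length : Int)) < k)
              then run ++ l.takeWhile (· == c) else []) ++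
            chunks (l.drop (l.takeWhile (· == c)).length) k) := by
  intro l
  induction l with
  | nil =>
    intro parts run c hne hall
    simp only [List.foldl_nil, List.takeWhile_nil, List.drop_nil, chunks, finishB]
    split_ifs with h1 h2 h2
    · simp
    · exact absurd (by simpa using h1.2) h2
    · exact absurd ⟨hne, by simpa using h2⟩ h1
    · simp
  | cons d l' ih =>
    intro parts run c hne hall
    have hlast : run.getLast? = some c := by
      rw [List.getLast?_eq_some_getLast hne]
      exact congrArg some (hall _ (List.getLast_mem hne))
    by_cases hdc : d = c
    · subst hdc
      have hstep : stepB k (parts, run) d = (parts, run ++ [d]) := by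
        simp [stepB, hne, hlast]
      rw [List.foldl_cons, hstep,
        ih parts (run ++ [d]) d (by simp) (by intro x hx; rcases List.mem_append.mp hx with h | h
                                              · exact hall x h
                                              · simpa using h)]
      have htw : (d :: l').takeWhile (· == d) = d :: l'.takeWhile (· == d) := by simp
      rw [htw]
      simp only [List.length_append, List.length_cons, List.length_nil, List.drop_succ_cons]
      congr 1
      split_ifs with h1 h2 <;> push_cast at * <;> first | omega | simp
    · have hstep : stepB k (parts, run) d =
          ((if run ≠ [] ∧ ((run.length : Int) < k) then parts ++ [run] else parts), [d]) := by
        have : ¬ (run ≠ [] ∧ run.getLast? = some d) := by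
          rintro ⟨-, h⟩; rw [hlast] at h; exact hdc (Option.some.inj h).symm
        simp [stepB, this]
      rw [List.foldl_cons, hstep,
        ih _ [d] d (by simp) (by simp)]
      have htw0 : (d :: l').takeWhile (· == c) = [] := by
        simp [hdc]
      rw [htw0]
      simp only [List.length_nil, List.drop_zero, List.append_nil, Nat.cast_zero, add_zero]
      rw [chunks_cons d l' k]
      have htw : (d :: l').takeWhile (· == d) = d :: l'.takeWhile (· == d) := by simp
      rw [htw]
      simp only [List.drop_succ_cons, List.length_cons]
      have hcond : (run ≠ [] ∧ (run.length : Int) < k) = ((run.length : Int) < k) := by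
        simp [hne]
      simp only [hcond, List.length_nil]
      split_ifs with h1 h2 h3 <;> push_cast at * <;> first | omega | simp

theorem A_chunks (a : List Char) (k : Int) : outerA a k 0 [] = chunks a k := by
  simpa using outerA_eq a k 0 []

theorem B_chunks (a : List Char) (k : Int) :
    (finishB k (a.foldl (stepB k) ([], []))).flatten = chunks a k := by
  cases a with
  | nil => simp [finishB, chunks]
  | cons d l' =>
    have hstep : stepB k (([] : List (List Char)), ([] : List Char)) d = ([], [d]) := by
      simp [stepB]
    rw [List.foldl_cons, hstep, B_run k l' [] [d] d (by simp) (by simp)]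
    rw [chunks_cons d l' k]
    have htw : (d :: l').takeWhile (· == d) = d :: l'.takeWhile (· == d) := by simp
    rw [htw]
    simp only [List.length_cons, List.length_nil, List.drop_succ_cons, List.flatten_nil,
      List.nil_append]
    congr 1
    split_ifs with h1 h2 <;> push_cast at * <;> first | omega | simp

-- ===== VERDICT (by name: the statement is the Claim_ definition above) =====
theorem print_s_spec : Claim_equal_print_s := by
  intro a k _
  unfold Spec_print_s print_s print_s_alt
  rw [A_chunks, B_chunks]
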